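-- pv_equiv track=rewrite | github.com/Robotrek-TechTatva/big-pp | Question1_Competetive_Programming/solution.py | f
-- ===== SOURCE A (Python) =====
-- def f(n):
--     count = 0
--     for num in range(1, n+1):
--         for b in range(2, num):
--             if b**3 > num:
--                 break
--             for a in range(2, num):
--                 if a**2 > num:
--                     break
--                 elif (a**2)*(b**3) == num:
--                     count += 1
--                     break
--     return count
-- ===== SOURCE B (Python) =====
-- def f(n):
--     count = 0
--     for b in range(2, n):
--         b3 = b * b * b
--         if 4 * b3 > n:
--             break
--         for a in range(2, n):
--             if a * a * b3 > n:
--                 break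
--             count += 1
--     return count
-- ===== Notes on version B (the rewrite author's own statement) =====
-- stated objective: faster
-- what changed: A enumerates every candidate value up to n and searches inside each for a square-times-cube factorisation; B drops that outer enumeration and directly counts the pairs (a,b) of integers at least two with a^2*b^3 <= n, bounding both loops by the growth of a^2*b^3.
import Mathlib
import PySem

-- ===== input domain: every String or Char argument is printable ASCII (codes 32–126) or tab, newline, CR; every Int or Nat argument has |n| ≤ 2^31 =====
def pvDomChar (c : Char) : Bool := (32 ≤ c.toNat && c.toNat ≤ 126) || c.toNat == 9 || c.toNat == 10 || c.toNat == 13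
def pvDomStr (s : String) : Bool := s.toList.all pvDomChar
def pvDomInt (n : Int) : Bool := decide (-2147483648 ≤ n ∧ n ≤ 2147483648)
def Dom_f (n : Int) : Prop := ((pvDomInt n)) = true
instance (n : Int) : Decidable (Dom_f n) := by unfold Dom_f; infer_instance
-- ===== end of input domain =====

-- B drops A's outer enumeration of every num ≤ n and counts the pairs (a,b) with a²b³ ≤ n directly (objective: faster).

-- ===== PORT A =====
-- inner 'for a in range(2, num)' loop: breaks at a²>num, adds 1 and breaks at a²b³=num
def aLoopA : List Int → Int → Int → Int
  | [], _, _ => 0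
  | a :: rest, num, b =>
    if a^2 > num then 0
    else if a^2 * b^3 = num then 1
    else aLoopA rest num b

-- 'for b in range(2, num)' loop: breaks at b³>num, else runs the a-loop
def bLoopA : List Int → Int → Int
  | [], _ => 0
  | b :: rest, num =>
    if b^3 > num then 0
    else aLoopA (PySem.List.pyRange 2 num 1) num b + bLoopA rest num

def f (n : Int) : Int :=
  (PySem.List.pyRange 1 (n + 1) 1).foldl
    (fun count num => count + bLoopA (PySem.List.pyRange 2 num 1) num) 0

-- ===== PORT B =====
-- inner 'for a in range(2, n)' loop of B: breaks at a·a·b3>n, else counts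
def innerB : List Int → Int → Int → Int
  | [], _, _ => 0
  | a :: rest, b3, n =>
    if a * a * b3 > n then 0
    else 1 + innerB rest b3 n

-- outer 'for b in range(2, n)' loop of B: breaks at 4·b3>n
def outerB : List Int → Int → Int
  | [], _ => 0
  | b :: rest, n =>
    let b3 := b * b * b
    if 4 * b3 > n then 0
    else innerB (PySem.List.pyRange 2 n 1) b3 n + outerB rest n

def f_alt (n : Int) : Int := outerB (PySem.List.pyRange 2 n 1) n

-- ===== PRECONDITION & SPEC =====
def Spec_f (n : Int) (out : Int) : Prop := out = f_alt n
instance (n : Int) (out : Int) : Decidable (Spec_f n out) := by unfold Spec_f; infer_instance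

-- ===== CLAIM (what is proved, stated in full; the proofs are below) =====
def Claim_equal_f : Prop := ∀ (n : Int), Dom_f n → Spec_f n (f n)

-- ===== LEMMAS AND PROOFS =====

-- number of pairs (a,b), 2 ≤ a,b < num, with a²b³ = num (what A's inner two loops add for one num)
noncomputable def Ecnt (num : Int) : Int :=
  ∑ b ∈ Finset.Ico (2:ℤ) num, ∑ a ∈ Finset.Ico (2:ℤ) num, (if a^2 * b^3 = num then (1:ℤ) else 0)

-- number of pairs (a,b), 2 ≤ a,b < n, with a²b³ ≤ n (what B counts)
noncomputable def Pcnt (n : Int) : Int :=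
  ∑ b ∈ Finset.Ico (2:ℤ) n, ∑ a ∈ Finset.Ico (2:ℤ) n, (if a^2 * b^3 ≤ n then (1:ℤ) else 0)

lemma cube8 (b : ℤ) (hb : 2 ≤ b) : 8 ≤ b^3 := by
  nlinarith [mul_nonneg (by linarith : (0:ℤ) ≤ b - 2) (mul_nonneg (by linarith : (0:ℤ) ≤ b) (by linarith : (0:ℤ) ≤ b))]

lemma key_lt (a b : ℤ) (ha : 2 ≤ a) (hb : 2 ≤ b) : a < a^2 * b^3 ∧ b < a^2 * b^3 := by
  have h1 : 8 ≤ b^3 := cube8 b hb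
  have h2 : 4 ≤ a^2 := by nlinarith
  have h3 : a^2 * 8 ≤ a^2 * b^3 := by nlinarith [sq_nonneg a]
  have h4 : 4 * b ≤ b^3 := by
    nlinarith [mul_nonneg (by linarith : (0:ℤ) ≤ b) (by nlinarith : (0:ℤ) ≤ b^2 - 4)]
  have h5 : 4 * b^3 ≤ a^2 * b^3 := by nlinarith
  constructor <;> nlinarith

lemma bound_lt (a b m : ℤ) (ha : 2 ≤ a) (hb : 2 ≤ b) (h : a^2 * b^3 ≤ m) : a < m ∧ b < m := by
  obtain ⟨h1, h2⟩ := key_lt a b ha hb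
  exact ⟨by linarith, by linarith⟩

lemma Ico_cons (c num : ℤ) (h : c < num) :
    Finset.Ico c num = insert c (Finset.Ico (c+1) num) := by
  ext x; simp only [Finset.mem_Ico, Finset.mem_insert]; omega

lemma aLoopA_eq : ∀ (k : ℕ) (c num b : ℤ), 2 ≤ c → 2 ≤ b → num ≤ c + k →
    aLoopA (PySem.List.pyRange c num 1) num b
      = ∑ a ∈ Finset.Ico c num, (if a^2 * b^3 = num then (1:ℤ) else 0) := by
  intro k
  induction k with
  | zero =>
    intro c num b hc hb hk
    rw [PySem.List.pyRange_one_eq_nil (by omega), Finset.Ico_eq_empty (by omega)]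
    simp [aLoopA]
  | succ k ih =>
    intro c num b hc hb hk
    by_cases hcn : num ≤ c
    · rw [PySem.List.pyRange_one_eq_nil hcn, Finset.Ico_eq_empty (by omega)]
      simp [aLoopA]
    · push Not at hcn
      rw [PySem.List.pyRange_one_cons hcn]
      simp only [aLoopA]
      have h8 : 8 ≤ b^3 := cube8 b hb
      by_cases h1 : c^2 > num
      · rw [if_pos h1]
        symm
        apply Finset.sum_eq_zero
        intro a ha
        simp only [Finset.mem_Ico] at ha
        rw [if_neg]
        intro he
        have h2 : c^2 ≤ a^2 := by nlinarith [ha.1]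
        nlinarith [sq_nonneg a]
      · rw [if_neg h1]
        push Not at h1
        rw [Ico_cons c num hcn, Finset.sum_insert (by simp [Finset.mem_Ico])]
        by_cases h2 : c^2 * b^3 = num
        · rw [if_pos h2, if_pos h2]
          have : ∑ a ∈ Finset.Ico (c+1) num, (if a^2 * b^3 = num then (1:ℤ) else 0) = 0 := by
            apply Finset.sum_eq_zero
            intro a ha
            simp only [Finset.mem_Ico] at ha
            rw [if_neg]
            intro he
            have hac : c < a := by omega
            have hsq : c^2 < a^2 := by nlinarith [mul_pos (by omega : (0:ℤ) < a - c) (by omega : (0:ℤ) < a + c)]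
            nlinarith [mul_lt_mul_of_pos_right hsq (by linarith : (0:ℤ) < b^3)]
          rw [this]
          norm_num
        · rw [if_neg h2, if_neg h2, ih (c+1) num b (by omega) hb (by omega), zero_add]

lemma bLoopA_eq : ∀ (k : ℕ) (c num : ℤ), 2 ≤ c → num ≤ c + k →
    bLoopA (PySem.List.pyRange c num 1) num
      = ∑ b ∈ Finset.Ico c num, ∑ a ∈ Finset.Ico (2:ℤ) num, (if a^2 * b^3 = num then (1:ℤ) else 0) := by
  intro k
  induction k with
  | zero =>
    intro c num hc hk
    rw [PySem.List.pyRange_one_eq_nil (by omega), Finset.Ico_eq_empty (by omega)]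
    simp [bLoopA]
  | succ k ih =>
    intro c num hc hk
    by_cases hcn : num ≤ c
    · rw [PySem.List.pyRange_one_eq_nil hcn, Finset.Ico_eq_empty (by omega)]
      simp [bLoopA]
    · push Not at hcn
      rw [PySem.List.pyRange_one_cons hcn]
      simp only [bLoopA]
      by_cases h1 : c^3 > num
      · rw [if_pos h1]
        symm
        apply Finset.sum_eq_zero
        intro b hbmem
        simp only [Finset.mem_Ico] at hbmem
        apply Finset.sum_eq_zero
        intro a ha
        simp only [Finset.mem_Ico] at ha
        rw [if_neg]
        intro he
        have hc3 : c^3 ≤ b^3 := pow_le_pow_left₀ (by omega) hbmem.1 3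
        have ha2 : 4 ≤ a^2 := by nlinarith [ha.1]
        nlinarith [cube8 b (by omega : 2 ≤ b)]
      · rw [if_neg h1]
        rw [Ico_cons c num hcn, Finset.sum_insert (by simp [Finset.mem_Ico])]
        rw [aLoopA_eq (num - 2).toNat 2 num c (by omega) hc (by omega)]
        rw [ih (c+1) num (by omega) (by omega)]

lemma innerB_eq : ∀ (k : ℕ) (c b3 n : ℤ), 2 ≤ c → 0 < b3 → n ≤ c + k →
    innerB (PySem.List.pyRange c n 1) b3 n
      = ∑ a ∈ Finset.Ico c n, (if a * a * b3 ≤ n then (1:ℤ) else 0) := by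
  intro k
  induction k with
  | zero =>
    intro c b3 n hc hb3 hk
    rw [PySem.List.pyRange_one_eq_nil (by omega), Finset.Ico_eq_empty (by omega)]
    simp [innerB]
  | succ k ih =>
    intro c b3 n hc hb3 hk
    by_cases hcn : n ≤ c
    · rw [PySem.List.pyRange_one_eq_nil hcn, Finset.Ico_eq_empty (by omega)]
      simp [innerB]
    · push Not at hcn
      rw [PySem.List.pyRange_one_cons hcn]
      simp only [innerB]
      by_cases h1 : c * c * b3 > n
      · rw [if_pos h1]
        symm
        apply Finset.sum_eq_zero
        intro a ha
        simp only [Finset.mem_Ico] at ha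
        rw [if_neg]
        push Not
        have : c * c ≤ a * a := by nlinarith [ha.1]
        nlinarith
      · rw [if_neg h1]
        push Not at h1
        rw [Ico_cons c n hcn, Finset.sum_insert (by simp [Finset.mem_Ico])]
        rw [if_pos h1, ih (c+1) b3 n (by omega) hb3 (by omega)]

lemma outerB_eq : ∀ (k : ℕ) (c n : ℤ), 2 ≤ c → n ≤ c + k →
    outerB (PySem.List.pyRange c n 1) n
      = ∑ b ∈ Finset.Ico c n, ∑ a ∈ Finset.Ico (2:ℤ) n, (if a^2 * b^3 ≤ n then (1:ℤ) else 0) := by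
  intro k
  induction k with
  | zero =>
    intro c n hc hk
    rw [PySem.List.pyRange_one_eq_nil (by omega), Finset.Ico_eq_empty (by omega)]
    simp [outerB]
  | succ k ih =>
    intro c n hc hk
    by_cases hcn : n ≤ c
    · rw [PySem.List.pyRange_one_eq_nil hcn, Finset.Ico_eq_empty (by omega)]
      simp [outerB]
    · push Not at hcn
      rw [PySem.List.pyRange_one_cons hcn]
      simp only [outerB]
      by_cases h1 : 4 * (c * c * c) > n
      · rw [if_pos h1]
        symm
        apply Finset.sum_eq_zero
        intro b hbmem
        simp only [Finset.mem_Ico] at hbmem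
        apply Finset.sum_eq_zero
        intro a ha
        simp only [Finset.mem_Ico] at ha
        rw [if_neg]
        push Not
        have hc3 : c^3 ≤ b^3 := pow_le_pow_left₀ (by omega) hbmem.1 3
        have ha2 : 4 ≤ a^2 := by nlinarith [ha.1]
        nlinarith [cube8 b (by omega : 2 ≤ b)]
      · rw [if_neg h1]
        rw [Ico_cons c n hcn, Finset.sum_insert (by simp [Finset.mem_Ico])]
        rw [innerB_eq (n - 2).toNat 2 (c * c * c) n (by omega) (by nlinarith) (by omega)]
        rw [ih (c+1) n (by omega) (by omega)]
        congr 1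
        apply Finset.sum_congr rfl
        intro a _
        have : a * a * (c * c * c) = a^2 * c^3 := by ring
        rw [this]

lemma f_alt_eq (n : ℤ) : f_alt n = Pcnt n := by
  unfold f_alt Pcnt
  exact outerB_eq (n - 2).toNat 2 n (le_refl _) (by omega)

lemma amb_ext (m n : ℤ) (h : m ≤ n) :
    (∑ b ∈ Finset.Ico (2:ℤ) n, ∑ a ∈ Finset.Ico (2:ℤ) n, (if a^2 * b^3 ≤ m then (1:ℤ) else 0))
      = Pcnt m := by
  symm
  unfold Pcnt
  calc ∑ b ∈ Finset.Ico (2:ℤ) m, ∑ a ∈ Finset.Ico (2:ℤ) m, (if a^2 * b^3 ≤ m then (1:ℤ) else 0)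
      = ∑ b ∈ Finset.Ico (2:ℤ) m, ∑ a ∈ Finset.Ico (2:ℤ) n, (if a^2 * b^3 ≤ m then (1:ℤ) else 0) := by
        apply Finset.sum_congr rfl
        intro b hb
        simp only [Finset.mem_Ico] at hb
        apply Finset.sum_subset (Finset.Ico_subset_Ico le_rfl h)
        intro a hamem hanot
        simp only [Finset.mem_Ico] at hamem hanot
        rw [if_neg]
        intro hle
        have := (bound_lt a b m (by omega) hb.1 hle).1
        omega
    _ = ∑ b ∈ Finset.Ico (2:ℤ) n, ∑ a ∈ Finset.Ico (2:ℤ) n, (if a^2 * b^3 ≤ m then (1:ℤ) else 0) := by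
        apply Finset.sum_subset (Finset.Ico_subset_Ico le_rfl h)
        intro b hbmem hbnot
        simp only [Finset.mem_Ico] at hbmem hbnot
        apply Finset.sum_eq_zero
        intro a hamem
        simp only [Finset.mem_Ico] at hamem
        rw [if_neg]
        intro hle
        have := (bound_lt a b m hamem.1 (by omega) hle).2
        omega

lemma Pcnt_step (n : ℤ) : Pcnt n = Pcnt (n - 1) + Ecnt n := by
  rw [← amb_ext (n-1) n (by omega)]
  unfold Pcnt Ecnt
  rw [← Finset.sum_add_distrib]
  apply Finset.sum_congr rfl
  intro b _
  rw [← Finset.sum_add_distrib]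
  apply Finset.sum_congr rfl
  intro a _
  split_ifs <;> omega

lemma f_nat : ∀ (k : ℕ), f (k : ℤ) = Pcnt (k : ℤ) := by
  intro k
  induction k with
  | zero =>
    simp [f, Pcnt]
  | succ k ih =>
    have hc : ((k+1:ℕ):ℤ) = (k:ℤ)+1 := by push_cast; ring
    rw [hc]
    unfold f
    rw [PySem.List.pyRange_one_succ_right (by omega : (1:ℤ) ≤ (k:ℤ)+1), List.foldl_append]
    simp only [List.foldl_cons, List.foldl_nil]
    have hf : (PySem.List.pyRange 1 ((k:ℤ) + 1) 1).foldl
        (fun count num => count + bLoopA (PySem.List.pyRange 2 num 1) num) 0 = f (k:ℤ) := rfl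
    rw [hf, ih, bLoopA_eq ((k:ℤ)+1-2).toNat 2 ((k:ℤ)+1) le_rfl (by omega)]
    rw [Pcnt_step ((k:ℤ)+1)]
    simp only [add_sub_cancel_right]
    rfl

-- ===== VERDICT (by name: the statement is the Claim_ definition above) =====
theorem f_spec : Claim_equal_f := by
  intro n _
  unfold Spec_f
  rw [f_alt_eq]
  by_cases h : 0 ≤ n
  · obtain ⟨k, rfl⟩ := Int.eq_ofNat_of_zero_le h
    exact f_nat k
  · have h1 : PySem.List.pyRange 1 (n + 1) 1 = [] := PySem.List.pyRange_one_eq_nil (by omega)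
    have h2 : Finset.Ico (2:ℤ) n = ∅ := Finset.Ico_eq_empty (by omega)
    simp only [f, Pcnt, h1, h2, List.foldl_nil, Finset.sum_empty]
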